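-- pv_equiv track=rewrite | github.com/frezcirno/CodeGAN | preprocess/process.py | truncate_docstring
-- ===== SOURCE A (Python) =====
-- from typing import List, Literal
--
-- def truncate_docstring(s: List[str]) -> List[str]:
--     """ truncate docstrings at the first "@param" or "." """
--     res = []
--     for t in s:
--         if t == "@param":
--             break
--         res.append(t)
--         if t == ".":
--             break
--     return res
-- ===== SOURCE B (Python) =====
-- def truncate_docstring(s):
--     """ truncate docstrings at the first "@param" or "." """
--     i = next((j for j, t in enumerate(s) if t in ("@param", ".")), None)
--     if i is None:
--         return list(s)
--     return s[:i] if s[i] == "@param" else s[:i + 1]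
-- ===== Notes on version B (the rewrite author's own statement) =====
-- stated objective: simpler
-- what changed: Replaces the accumulate-and-break loop with a single cut-point search (first index holding '@param' or '.') followed by one slice, keeping the period and dropping the '@param'.
import Mathlib
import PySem

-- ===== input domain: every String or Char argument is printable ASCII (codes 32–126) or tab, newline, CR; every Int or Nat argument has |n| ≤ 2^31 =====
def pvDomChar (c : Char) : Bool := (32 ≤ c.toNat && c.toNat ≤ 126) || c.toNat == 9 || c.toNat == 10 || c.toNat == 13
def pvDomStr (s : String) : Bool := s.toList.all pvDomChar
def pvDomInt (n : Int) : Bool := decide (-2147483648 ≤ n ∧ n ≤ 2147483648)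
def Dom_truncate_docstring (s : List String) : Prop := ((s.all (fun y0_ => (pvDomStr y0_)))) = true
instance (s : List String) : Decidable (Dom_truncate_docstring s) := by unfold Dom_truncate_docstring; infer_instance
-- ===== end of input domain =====

-- B replaces A's accumulate-and-break loop by a single cut-point search plus one slice (objective: simpler).

-- ===== PORT A =====
-- loop over s with accumulator res, breaking before '@param' and after '.'
def truncate_docstring_loop (res : List String) : List String → List String
  | [] => res
  | t :: rest =>
    if t = "@param" then res
    else if t = "." then res ++ [t]
    else truncate_docstring_loop (res ++ [t]) rest

def truncate_docstring (s : List String) : List String :=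
  truncate_docstring_loop [] s

-- ===== PORT B =====
-- first index whose token is '@param' or '.', then one slice (s[:i] or s[:i+1])
def truncate_docstring_alt (s : List String) : List String :=
  match s.findIdx? (fun t => t == "@param" || t == ".") with
  | none => s
  | some i => if (s[i]?).getD "" = "@param" then s.take i else s.take (i + 1)

-- ===== PRECONDITION & SPEC =====
def Spec_truncate_docstring (s : List String) (out : List String) : Prop := out = truncate_docstring_alt s
instance (s : List String) (out : List String) : Decidable (Spec_truncate_docstring s out) := by unfold Spec_truncate_docstring; infer_instance

-- ===== CLAIM (what is proved, stated in full; the proofs are below) =====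
def Claim_equal_truncate_docstring : Prop := ∀ (s : List String), Dom_truncate_docstring s → Spec_truncate_docstring s (truncate_docstring s)

-- ===== LEMMAS AND PROOFS =====

theorem truncate_docstring_loop_eq (s : List String) :
    ∀ res, truncate_docstring_loop res s = res ++ truncate_docstring_alt s := by
  induction s with
  | nil => intro res; simp [truncate_docstring_loop, truncate_docstring_alt]
  | cons t rest ih =>
    intro res
    by_cases h1 : t = "@param"
    · simp [truncate_docstring_loop, truncate_docstring_alt, List.findIdx?_cons, h1]
    · by_cases h2 : t = "."
      · simp [truncate_docstring_loop, truncate_docstring_alt, List.findIdx?_cons, h2]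
      · have hp : (t == "@param" || t == ".") = false := by
          simp [h1, h2]
        simp only [truncate_docstring_loop, if_neg h1, if_neg h2, ih]
        unfold truncate_docstring_alt
        simp only [List.findIdx?_cons, hp]
        cases hf : rest.findIdx? (fun t => t == "@param" || t == ".") with
        | none => simp
        | some i =>
          simp only [Option.map_some]
          simp only [List.take_succ_cons]
          split <;> simp_all

-- ===== VERDICT (by name: the statement is the Claim_ definition above) =====
theorem truncate_docstring_spec : Claim_equal_truncate_docstring := by
  intro s _
  unfold Spec_truncate_docstring truncate_docstring
  simpa using truncate_docstring_loop_eq s []
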